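-- pv_equiv track=rewrite | github.com/ArturGaspar/scrapy-qtwebkit | scrapy_qtwebkit/browser/_cookies_for_url.py | _potential_domain_matches
-- ===== SOURCE A (Python) =====
-- def _potential_domain_matches(domain):
--     """
--
--     Potential domain matches for a cookie.
--
--     >>> _potential_domain_matches('www.example.com')
--     ['www.example.com', 'example.com', '.www.example.com', '.example.com']
--
--     From scrapy.http.cookies.potential_domain_matches().
--
--     """
--
--     matches = [domain]
--     try:
--         start = domain.index('.') + 1
--         end = domain.rindex('.')
--         while start < end:
--             matches.append(domain[start:])
--             start = domain.index('.', start) + 1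
--     except ValueError:
--         pass
--     return matches + ['.' + d for d in matches]
-- ===== SOURCE B (Python) =====
-- def _potential_domain_matches(domain):
--     # Single right-to-left character scan: the rightmost dot is discovered first
--     # (no rindex/index calls, no exception handling); every later dot at i yields
--     # the suffix domain[i+1:] when i + 1 is left of the rightmost dot.
--     sufs = []
--     last = -1
--     for i in range(len(domain) - 1, -1, -1):
--         if domain[i] == '.':
--             if last < 0:
--                 last = i
--             elif i + 1 < last:
--                 sufs.append(domain[i + 1:])
--     ms = [domain] + sufs[::-1]
--     return ms + ['.' + d for d in ms]
-- ===== Notes on version B (the rewrite author's own statement) =====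
-- stated objective: alternative
-- what changed: B replaces A's try/except walk that repeatedly calls str.index/str.rindex left-to-right with a single right-to-left character scan that discovers the last dot first, collects qualifying suffixes in reverse and un-reverses them once at the end.
import Mathlib
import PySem

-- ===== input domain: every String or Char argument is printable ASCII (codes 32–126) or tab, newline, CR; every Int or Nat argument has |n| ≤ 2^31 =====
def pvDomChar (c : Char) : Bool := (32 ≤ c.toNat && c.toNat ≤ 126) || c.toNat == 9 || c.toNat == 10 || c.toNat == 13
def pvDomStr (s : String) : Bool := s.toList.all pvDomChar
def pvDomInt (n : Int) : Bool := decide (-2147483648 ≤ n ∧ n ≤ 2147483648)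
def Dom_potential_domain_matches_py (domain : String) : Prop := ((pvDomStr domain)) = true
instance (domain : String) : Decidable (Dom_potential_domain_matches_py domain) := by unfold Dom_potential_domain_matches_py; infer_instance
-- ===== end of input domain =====

-- B replaces A's try/except index/rindex walk by one right-to-left character scan
-- (objective: alternative decomposition, same cost).

-- ===== PORT A =====
-- domain.index('.', i) : first index ≥ the start of the scanned tail; none = ValueError (exact hand port)
def findDotAux : List Char → Nat → Option Nat
  | [], _ => none
  | c :: r, i => if c = '.' then some i else findDotAux r (i + 1)

-- domain.rindex('.') scanned left-to-right keeping the last hit; none = ValueError (exact hand port)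
def lastDotAux : List Char → Nat → Option Nat → Option Nat
  | [], _, acc => acc
  | c :: r, i, acc => lastDotAux r (i + 1) (if c = '.' then some i else acc)

-- needed by loopA's termination proof
theorem findDotAux_ge : ∀ (l : List Char) (i p : Nat), findDotAux l i = some p → i ≤ p := by
  intro l
  induction l with
  | nil => intro i p h; simp [findDotAux] at h
  | cons c r ih =>
    intro i p h
    by_cases hc : c = '.'
    · simp [findDotAux, hc] at h; omega
    · simp [findDotAux, hc] at h
      have := ih (i + 1) p h; omega

-- the while loop: append domain[start:], advance start to the next dot + 1;
-- a failed index (ValueError) ends the try block keeping ms so far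
def loopA (cs : List Char) (e : Nat) (s : Nat) : List String :=
  if _h : s < e then
    String.ofList (cs.drop s) ::
      (match hf : findDotAux (cs.drop s) s with
       | some p => loopA cs e (p + 1)
       | none => [])
  else []
termination_by e - s
decreasing_by
  have := findDotAux_ge (cs.drop s) s p hf
  omega

def potential_domain_matches_py (domain : String) : List String :=
  let cs := domain.toList
  let ms : List String :=
    match findDotAux cs 0 with
    | none => [domain]                    -- index('.') raised: except ValueError: pass
    | some i =>
      match lastDotAux cs 0 none with
      | none => [domain]                  -- rindex('.') raised (cannot happen when a dot exists)
      | some e => domain :: loopA cs e (i + 1)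
  ms ++ ms.map (fun d => String.ofList ('.' :: d.toList))

-- ===== PORT B =====
-- the for-loop over range(len(domain)-1, -1, -1): at fuel k+1 the index is k;
-- last : Int starts at -1 as in Source B; domain[i] is in range, so List.getD is exact
def bLoop (cs : List Char) : Nat → Int → List String → List String
  | 0, _last, sufs => sufs
  | k + 1, last, sufs =>
    if cs.getD k ' ' = '.' then
      if last < 0 then bLoop cs k (k : Int) sufs
      else if (k : Int) + 1 < last then
        bLoop cs k last (sufs ++ [String.ofList (cs.drop (k + 1))])
      else bLoop cs k last sufs
    else bLoop cs k last sufs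

def potential_domain_matches_py_alt (domain : String) : List String :=
  let cs := domain.toList
  let sufs := bLoop cs cs.length (-1) []
  let ms := domain :: sufs.reverse        -- [domain] + sufs[::-1]
  ms ++ ms.map (fun d => String.ofList ('.' :: d.toList))

-- ===== PRECONDITION & SPEC =====
def Spec_potential_domain_matches_py (domain : String) (out : List String) : Prop := out = potential_domain_matches_py_alt domain
instance (domain : String) (out : List String) : Decidable (Spec_potential_domain_matches_py domain out) := by unfold Spec_potential_domain_matches_py; infer_instance

-- ===== CLAIM (what is proved, stated in full; the proofs are below) =====
def Claim_equal_potential_domain_matches_py : Prop := ∀ (domain : String), Dom_potential_domain_matches_py domain → Spec_potential_domain_matches_py domain (potential_domain_matches_py domain)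

-- ===== LEMMAS AND PROOFS =====

-- proof-only helper: the increasing list of dot positions of l, offset by i
def dotsOf : List Char → Nat → List Nat
  | [], _ => []
  | c :: r, i => if c = '.' then i :: dotsOf r (i + 1) else dotsOf r (i + 1)

theorem dotsOf_ge : ∀ (l : List Char) (i p : Nat), p ∈ dotsOf l i → i ≤ p := by
  intro l
  induction l with
  | nil => intro i p h; simp [dotsOf] at h
  | cons c r ih =>
    intro i p h
    by_cases hc : c = '.' <;> simp [dotsOf, hc] at h
    · rcases h with h | h
      · omega
      · have := ih (i + 1) p h; omega
    · have := ih (i + 1) p h; omega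

theorem dotsOf_lt : ∀ (l : List Char) (i p : Nat), p ∈ dotsOf l i → p < i + l.length := by
  intro l
  induction l with
  | nil => intro i p h; simp [dotsOf] at h
  | cons c r ih =>
    intro i p h
    by_cases hc : c = '.' <;> simp [dotsOf, hc] at h
    · rcases h with h | h
      · simp; omega
      · have := ih (i + 1) p h; simp at this ⊢; omega
    · have := ih (i + 1) p h; simp at this ⊢; omega

theorem dotsOf_pairwise : ∀ (l : List Char) (i : Nat), (dotsOf l i).Pairwise (· < ·) := by
  intro l
  induction l with
  | nil => intro i; simp [dotsOf]
  | cons c r ih =>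
    intro i
    by_cases hc : c = '.' <;> simp [dotsOf, hc]
    · exact ⟨fun p hp => by have := dotsOf_ge r (i + 1) p hp; omega, ih (i + 1)⟩
    · exact ih (i + 1)

theorem dotsOf_append : ∀ (l1 l2 : List Char) (i : Nat),
    dotsOf (l1 ++ l2) i = dotsOf l1 i ++ dotsOf l2 (i + l1.length) := by
  intro l1
  induction l1 with
  | nil => intro l2 i; simp [dotsOf]
  | cons c r ih =>
    intro l2 i
    by_cases hc : c = '.' <;>
      simp [dotsOf, hc, ih l2 (i + 1), Nat.add_assoc, Nat.add_comm 1]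

theorem dotsOf_getD : ∀ (l : List Char) (i p : Nat),
    (i + p) ∈ dotsOf l i ↔ l.getD p ' ' = '.' := by
  intro l
  induction l with
  | nil => intro i p; simp [dotsOf, List.getD]
  | cons c r ih =>
    intro i p
    cases p with
    | zero =>
      rw [Nat.add_zero, List.getD_cons_zero]
      by_cases hc : c = '.'
      · simp [dotsOf, hc]
      · simp only [dotsOf, if_neg hc]
        simp [hc]
        intro h
        exact absurd (dotsOf_ge r (i + 1) i h) (by omega)
    | succ p =>
      have h1 := ih (i + 1) p
      have e1 : i + (p + 1) = (i + 1) + p := by omega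
      rw [e1, List.getD_cons_succ]
      by_cases hc : c = '.'
      · rw [show dotsOf (c :: r) i = i :: dotsOf r (i + 1) by simp [dotsOf, hc]]
        rw [List.mem_cons]
        constructor
        · rintro (h | h)
          · exact absurd h (by omega)
          · exact h1.mp h
        · intro h
          exact Or.inr (h1.mpr h)
      · rw [show dotsOf (c :: r) i = dotsOf r (i + 1) by simp [dotsOf, hc]]
        exact h1

theorem findFrom : ∀ (l : List Char) (i s : Nat),
    findDotAux (l.drop s) (i + s) = ((dotsOf l i).filter (fun p => decide (i + s ≤ p))).head? := by
  intro l
  induction l with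
  | nil => intro i s; simp [findDotAux, dotsOf]
  | cons c r ih =>
    intro i s
    cases s with
    | zero =>
      by_cases hc : c = '.' <;> simp [findDotAux, dotsOf, hc]
      have h1 := ih (i + 1) 0
      simp at h1
      rw [h1, ← List.head?_filter, ← List.head?_filter]
      congr 1
      apply List.filter_congr
      intro p hp
      have := dotsOf_ge r (i + 1) p hp
      simp; omega
    | succ s =>
      have h1 := ih (i + 1) s
      have e1 : i + (s + 1) = i + 1 + s := by omega
      by_cases hc : c = '.' <;>
        simp [dotsOf, hc, List.drop_succ_cons, e1, h1]
      rw [List.find?_cons_of_neg (by simp; omega)]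

theorem lastDot_eq : ∀ (l : List Char) (i : Nat) (acc : Option Nat),
    lastDotAux l i acc = ((dotsOf l i).getLast?).or acc := by
  intro l
  induction l with
  | nil => intro i acc; simp [lastDotAux, dotsOf]
  | cons c r ih =>
    intro i acc
    by_cases hc : c = '.' <;> simp [lastDotAux, dotsOf, hc, ih (i + 1)]
    cases hg : (dotsOf r (i + 1)).getLast? with
    | none =>
      rw [List.getLast?_eq_none_iff] at hg
      simp [hg]
    | some x =>
      rcases List.exists_cons_of_ne_nil (by intro hnil; rw [hnil] at hg; simp at hg : dotsOf r (i + 1) ≠ []) with ⟨b, t, hbt⟩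
      simp [hbt, List.getLast?_cons_cons] at hg ⊢
      simp [hg]

theorem head_min : ∀ (ds : List Nat), ds.Pairwise (· < ·) →
    ∀ m, ds.head? = some m → ∀ p ∈ ds, m ≤ p := by
  intro ds hpw m hm p hp
  cases ds with
  | nil => simp at hm
  | cons a t =>
    simp at hm
    subst hm
    rcases hp with _ | hp
    · omega
    · exact le_of_lt ((List.pairwise_cons.mp hpw).1 p (by assumption))

theorem getLast_max : ∀ (ds : List Nat), ds.Pairwise (· < ·) →
    ∀ e, ds.getLast? = some e → ∀ p ∈ ds, p ≤ e := by
  intro ds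
  induction ds with
  | nil => intro _ e he; simp at he
  | cons a t ih =>
    intro hpw e he p hp
    rcases List.pairwise_cons.mp hpw with ⟨ha, hpt⟩
    cases t with
    | nil =>
      simp at he hp
      omega
    | cons b u =>
      rw [List.getLast?_cons_cons] at he
      have hemem : e ∈ b :: u := List.mem_of_getLast? he
      rcases List.mem_cons.mp hp with rfl | hpt'
      · exact le_of_lt (ha e hemem)
      · exact ih hpt e he p hpt'

theorem filter_mem_cons (e : Nat) : ∀ (ds : List Nat) (q : Nat), ds.Pairwise (· < ·) → q ∈ ds → q + 1 < e →
    ds.filter (fun p => decide (q ≤ p) && decide (p + 1 < e))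
      = q :: ds.filter (fun p => decide (q < p) && decide (p + 1 < e)) := by
  intro ds
  induction ds with
  | nil => intro q _ hm _; simp at hm
  | cons a t ih =>
    intro q hpw hm he
    rcases List.pairwise_cons.mp hpw with ⟨ha, hpt⟩
    rcases List.mem_cons.mp hm with rfl | hmt
    · rw [List.filter_cons_of_pos (by simp; omega),
          List.filter_cons_of_neg (by simp)]
      congr 1
      apply List.filter_congr
      intro p hp
      have := ha p hp
      simp [this, Nat.le_of_lt this]
    · have haq : a < q := ha q hmt
      rw [List.filter_cons_of_neg (by simp; omega), ih q hpt hmt he,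
          List.filter_cons_of_neg (by simp; omega)]

theorem loopA_eq (cs : List Char) (e : Nat) :
    ∀ (n q : Nat), e - (q + 1) ≤ n → q ∈ dotsOf cs 0 →
    loopA cs e (q + 1)
      = ((dotsOf cs 0).filter (fun p => decide (q ≤ p) && decide (p + 1 < e))).map
          (fun p => String.ofList (cs.drop (p + 1))) := by
  intro n
  induction n with
  | zero =>
    intro q hn _
    rw [loopA, dif_neg (by omega)]
    symm
    rw [List.map_eq_nil_iff, List.filter_eq_nil_iff]
    intro p _
    simp
    omega
  | succ n ih =>
    intro q hn hq
    by_cases h : q + 1 < e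
    · have hfind : findDotAux (cs.drop (q + 1)) (q + 1)
          = ((dotsOf cs 0).filter (fun p => decide (q + 1 ≤ p))).head? := by
        have := findFrom cs 0 (q + 1)
        simpa using this
      rw [loopA, dif_pos h,
          filter_mem_cons e (dotsOf cs 0) q (dotsOf_pairwise cs 0) hq h, List.map_cons]
      congr 1
      cases hfd : findDotAux (cs.drop (q + 1)) (q + 1) with
      | none =>
        show ([] : List String) = _
        have h0 : ((dotsOf cs 0).filter (fun p => decide (q + 1 ≤ p))) = [] :=
          List.head?_eq_none_iff.mp (hfind ▸ hfd)
        rw [List.filter_eq_nil_iff] at h0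
        symm
        rw [List.map_eq_nil_iff, List.filter_eq_nil_iff]
        intro p hp hb
        exact h0 p hp (by simp at hb ⊢; omega)
      | some p' =>
        have hh : ((dotsOf cs 0).filter (fun p => decide (q + 1 ≤ p))).head? = some p' :=
          hfind ▸ hfd
        have hp'f : p' ∈ (dotsOf cs 0).filter (fun p => decide (q + 1 ≤ p)) :=
          List.mem_of_mem_head? (by rw [hh]; simp)
        have hp'mem : p' ∈ dotsOf cs 0 := (List.mem_filter.mp hp'f).1
        have hp'ge : q + 1 ≤ p' := by
          have := (List.mem_filter.mp hp'f).2; simpa using this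
        show loopA cs e (p' + 1) = _
        rw [ih p' (by omega) hp'mem]
        congr 1
        apply List.filter_congr
        intro p hp
        by_cases hqp : q < p
        · have hpf : p ∈ (dotsOf cs 0).filter (fun r => decide (q + 1 ≤ r)) :=
            List.mem_filter.mpr ⟨hp, by simp; omega⟩
          have hmin := head_min _ ((dotsOf_pairwise cs 0).filter _) p' hh p hpf
          simp [hqp, hmin]
        · have : ¬ p' ≤ p := by omega
          simp [hqp, this]
    · rw [loopA, dif_neg h]
      symm
      rw [List.map_eq_nil_iff, List.filter_eq_nil_iff]
      intro p _
      simp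
      omega

-- B's loop in its collecting phase (last already set to a Nat)
theorem bLoop_pos (cs : List Char) (lastN : Nat) :
    ∀ (n : Nat) (sufs : List String),
    bLoop cs n (lastN : Int) sufs
      = sufs ++ (((dotsOf (cs.take n) 0).filter (fun p => decide (p + 1 < lastN))).map
          (fun p => String.ofList (cs.drop (p + 1)))).reverse := by
  intro n
  induction n with
  | zero => intro sufs; simp [bLoop, dotsOf]
  | succ k ih =>
    intro sufs
    have htake : cs.take (k + 1) = cs.take k ++ (cs[k]?).toList := List.take_add_one
    have hlenk : ∀ h : k < cs.length, (cs.take k).length = k := fun h => by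
      simp [List.length_take]; omega
    cases hk : cs[k]? with
    | none =>
      have hklen : cs.length ≤ k := by
        by_contra hcon
        exact absurd hk (by simp; omega)
      have hget : cs.getD k ' ' = ' ' := by
        simp [List.getD, hk]
      rw [bLoop, hget, if_neg (by decide), ih]
      rw [htake, hk]
      simp
    | some c =>
      have hklt : k < cs.length := by
        by_contra hcon
        rw [List.getElem?_eq_none (by omega)] at hk
        simp at hk
      have hget : cs.getD k ' ' = c := by simp [List.getD, hk]
      have hdots : dotsOf (cs.take (k + 1)) 0
          = dotsOf (cs.take k) 0 ++ (if c = '.' then [k] else []) := by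
        rw [htake, hk]
        show dotsOf (cs.take k ++ [c]) 0 = _
        rw [dotsOf_append]
        congr 1
        by_cases hc : c = '.' <;> simp [dotsOf, hc, hlenk hklt]
      by_cases hc : c = '.'
      · rw [bLoop, hget, if_pos hc, if_neg (by omega)]
        by_cases hlt : k + 1 < lastN
        · rw [if_pos (by exact_mod_cast hlt), ih]
          rw [hdots]
          simp [hc, List.filter_append, hlt]
        · rw [if_neg (by exact_mod_cast hlt), ih]
          rw [hdots]
          simp [hc, List.filter_append, hlt]
      · rw [bLoop, hget, if_neg hc, ih, hdots]
        simp [hc]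

-- B's loop skips the dot-free region above m
theorem bLoop_skip (cs : List Char) :
    ∀ (n m : Nat), m ≤ n → (∀ i, m ≤ i → i < n → cs.getD i ' ' ≠ '.') →
    bLoop cs n (-1) [] = bLoop cs m (-1) [] := by
  intro n
  induction n with
  | zero => intro m hm _; interval_cases m; rfl
  | succ k ih =>
    intro m hm hno
    rcases Nat.lt_or_ge m (k + 1) with hlt | hge
    · have hk : cs.getD k ' ' ≠ '.' := hno k (by omega) (by omega)
      rw [bLoop, if_neg hk]
      exact ih m (by omega) (fun i h1 h2 => hno i h1 (by omega))
    · have : m = k + 1 := by omega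
      rw [this]

-- ===== VERDICT (by name: the statement is the Claim_ definition above) =====
theorem potential_domain_matches_py_spec : Claim_equal_potential_domain_matches_py := by
  intro domain _
  unfold Spec_potential_domain_matches_py potential_domain_matches_py potential_domain_matches_py_alt
  set cs := domain.toList with hcs
  have hfd0 : findDotAux cs 0 = (dotsOf cs 0).head? := by
    have := findFrom cs 0 0
    simpa using this
  have hld : lastDotAux cs 0 none = (dotsOf cs 0).getLast? := by
    have := lastDot_eq cs 0 none
    simpa using this
  have hmemget : ∀ p : Nat, p ∈ dotsOf cs 0 ↔ cs.getD p ' ' = '.' := by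
    intro p
    have := dotsOf_getD cs 0 p
    simpa using this
  cases hds : dotsOf cs 0 with
  | nil =>
    have hB : bLoop cs cs.length (-1) [] = [] := by
      rw [bLoop_skip cs cs.length 0 (by omega)
        (fun i _ _ h => by rw [← hmemget i, hds] at h; simp at h)]
      rfl
    simp [hfd0, hds, hB]
  | cons d0 rest =>
    have hhead : (dotsOf cs 0).head? = some d0 := by rw [hds]; rfl
    cases hgl : (dotsOf cs 0).getLast? with
    | none =>
      rw [List.getLast?_eq_none_iff] at hgl
      rw [hds] at hgl
      simp at hgl
    | some e =>
      have hemem : e ∈ dotsOf cs 0 := by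
        rw [hds]; rw [hds] at hgl; exact List.mem_of_getLast? hgl
      have helt : e < cs.length := by
        have := dotsOf_lt cs 0 e hemem; simpa using this
      -- B's sufs
      have hB : bLoop cs cs.length (-1) []
          = (((dotsOf (cs.take e) 0).filter (fun p => decide (p + 1 < e))).map
              (fun p => String.ofList (cs.drop (p + 1)))).reverse := by
        rw [bLoop_skip cs cs.length (e + 1) (by omega)
          (fun i h1 h2 hdot => by
            have : i ∈ dotsOf cs 0 := (hmemget i).mpr hdot
            have := getLast_max (dotsOf cs 0) (dotsOf_pairwise cs 0) e hgl i this
            omega)]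
        rw [bLoop, if_pos ((hmemget e).mp hemem), if_pos (by norm_num)]
        exact bLoop_pos cs e e []
      -- relate dotsOf (take e) to dotsOf cs
      have hsplit : dotsOf cs 0 = dotsOf (cs.take e) 0 ++ dotsOf (cs.drop e) e := by
        conv_lhs => rw [← List.take_append_drop e cs]
        rw [dotsOf_append]
        congr 2
        simp [List.length_take]; omega
      have hfilt : (dotsOf cs 0).filter (fun p => decide (p + 1 < e))
          = (dotsOf (cs.take e) 0).filter (fun p => decide (p + 1 < e)) := by
        rw [hsplit, List.filter_append]
        have : (dotsOf (cs.drop e) e).filter (fun p => decide (p + 1 < e)) = [] := by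
          rw [List.filter_eq_nil_iff]
          intro p hp
          have := dotsOf_ge (cs.drop e) e p hp
          simp; omega
        simp [this]
      -- A's ms
      have hmem0 : d0 ∈ dotsOf cs 0 := by rw [hds]; exact List.mem_cons_self ..
      have hA : loopA cs e (d0 + 1)
          = ((dotsOf cs 0).filter (fun p => decide (p + 1 < e))).map
              (fun p => String.ofList (cs.drop (p + 1))) := by
        rw [loopA_eq cs e e d0 (by omega) hmem0]
        congr 1
        apply List.filter_congr
        intro p hp
        have := head_min (dotsOf cs 0) (dotsOf_pairwise cs 0) d0 hhead p hp
        simp [this]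
      simp only [hfd0, hld, hhead, hgl, hA, hB, hfilt, List.reverse_reverse]
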